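-- pv_equiv track=rewrite | github.com/Neeraj2088/RND | Test.py | chunk_by_character_count
-- ===== SOURCE A (Python) =====
-- from typing import List, Optional
--
-- def chunk_by_character_count(text: str, chunk_size: int = 1000, overlap: int = 100) -> List[str]:
--     """
--     Split text into chunks by character count with optional overlap.
--
--     Args:
--         text: Input text to chunk
--         chunk_size: Maximum characters per chunk
--         overlap: Number of overlapping characters between chunks
--
--     Returns:
--         List of text chunks
--     """
--     if chunk_size <= overlap:
--         raise ValueError("Chunk size must be greater than overlap")
--
--     chunks = []
--     start = 0
--
--     while start < len(text):
--         end = start + chunk_size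
--         chunk = text[start:end]
--         chunks.append(chunk)
--
--         if end >= len(text):
--             break
--
--         start = end - overlap
--
--     return chunks
-- ===== SOURCE B (Python) =====
-- def chunk_by_character_count(text: str, chunk_size: int = 1000, overlap: int = 100):
--     if chunk_size <= overlap:
--         raise ValueError("Chunk size must be greater than overlap")
--     step = chunk_size - overlap
--     chunks = []
--     rest = text
--     while len(rest) > chunk_size:
--         chunks.append(rest[:chunk_size])
--         rest = rest[step:]
--     if rest:
--         chunks.append(rest)
--     return chunks
-- ===== Notes on version B (the rewrite author's own statement) =====
-- stated objective: simpler
-- what changed: B consumes the string itself (slicing off a step-sized prefix each round, then appending the short remainder after the loop) instead of A's index-pointer loop with an in-loop break; Pre_ excludes negative chunk_size, which lies outside the function's natural domain: there A's negative slice end yields accidental truncated chunks while B's suffix-consuming loop does not terminate.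
-- outside the precondition, e.g. on chunk_by_character_count('ab', -1, -2): A returns ['a', ''], B does not finish within the time limit
import Mathlib
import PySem

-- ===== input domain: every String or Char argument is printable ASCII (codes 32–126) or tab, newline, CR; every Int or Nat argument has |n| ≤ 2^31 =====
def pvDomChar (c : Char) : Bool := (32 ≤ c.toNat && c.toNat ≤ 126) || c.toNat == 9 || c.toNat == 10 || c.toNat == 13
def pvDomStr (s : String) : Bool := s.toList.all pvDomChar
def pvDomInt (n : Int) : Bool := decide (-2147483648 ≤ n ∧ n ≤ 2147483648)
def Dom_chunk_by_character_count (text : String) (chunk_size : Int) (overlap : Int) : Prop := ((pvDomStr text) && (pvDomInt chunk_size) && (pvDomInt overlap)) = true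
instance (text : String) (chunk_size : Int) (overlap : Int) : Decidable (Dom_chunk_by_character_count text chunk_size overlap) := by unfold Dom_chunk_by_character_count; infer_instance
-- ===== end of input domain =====

-- B consumes the string itself, slicing off a step-sized prefix each round and appending the
-- short remainder after the loop, instead of A's index-pointer loop with an in-loop break
-- (objective: simpler decomposition, same cost).


-- ===== PORT A =====
-- the while loop of A: fuel only guards totality (under Pre_ the step is positive, so
-- len(text)+1 iterations always suffice and the 0-fuel branch is unreachable)
def chunkLoopA (text : String) (chunk_size : Int) (overlap : Int) :
    Nat → Int → List String → List String
  | 0, _, chunks => chunks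
  | fuel + 1, start, chunks =>
    if start < PySem.Str.len text then
      let e := start + chunk_size
      let chunk := PySem.Str.slice text (some start) (some e)
      let chunks := chunks ++ [chunk]
      if PySem.Str.len text ≤ e then chunks
      else chunkLoopA text chunk_size overlap fuel (e - overlap) chunks
    else chunks

def chunk_by_character_count (text : String) (chunk_size : Int) (overlap : Int) : List String :=
  if chunk_size ≤ overlap then []  -- Python raises ValueError here; excluded by Pre_
  else chunkLoopA text chunk_size overlap ((PySem.Str.len text).toNat + 1) 0 []

-- ===== PORT B =====
-- B's while loop: returns (chunks, rest) at exit; fuel only guards totality (under Pre_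
-- the step is positive, so len(text)+1 iterations always suffice)
def chunkLoopB (chunk_size step : Int) :
    Nat → String → List String → List String × String
  | 0, rest, chunks => (chunks, rest)
  | fuel + 1, rest, chunks =>
    if chunk_size < PySem.Str.len rest then
      chunkLoopB chunk_size step fuel (PySem.Str.slice rest (some step) none)
        (chunks ++ [PySem.Str.slice rest none (some chunk_size)])
    else (chunks, rest)

def chunk_by_character_count_alt (text : String) (chunk_size : Int) (overlap : Int) : List String :=
  if chunk_size ≤ overlap then []  -- Python raises ValueError here; excluded by Pre_
  else
    let step := chunk_size - overlap
    let r := chunkLoopB chunk_size step ((PySem.Str.len text).toNat + 1) text []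
    if r.2 = "" then r.1 else r.1 ++ [r.2]

-- ===== PRECONDITION & SPEC =====
-- Pre_ excludes chunk_size ≤ overlap, where A raises ValueError, and negative chunk_size,
-- which is outside the function's natural domain: there A's negative slice end produces
-- accidental truncated chunks while B's suffix-consuming loop never terminates.
def Pre_chunk_by_character_count (text : String) (chunk_size : Int) (overlap : Int) : Prop :=
  0 ≤ chunk_size ∧ overlap < chunk_size
instance (text : String) (chunk_size : Int) (overlap : Int) : Decidable (Pre_chunk_by_character_count text chunk_size overlap) := by unfold Pre_chunk_by_character_count; infer_instance
def pvWitness_chunk_by_character_count : String × Int × Int := ("hello world", 4, 1)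

def Spec_chunk_by_character_count (text : String) (chunk_size : Int) (overlap : Int) (out : List String) : Prop := out = chunk_by_character_count_alt text chunk_size overlap
instance (text : String) (chunk_size : Int) (overlap : Int) (out : List String) : Decidable (Spec_chunk_by_character_count text chunk_size overlap out) := by unfold Spec_chunk_by_character_count; infer_instance

-- ===== CLAIM =====
def Claim_equal_chunk_by_character_count : Prop := ∀ (text : String) (chunk_size : Int) (overlap : Int), Dom_chunk_by_character_count text chunk_size overlap → Pre_chunk_by_character_count text chunk_size overlap → Spec_chunk_by_character_count text chunk_size overlap (chunk_by_character_count text chunk_size overlap)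

-- ===== LEMMAS AND PROOFS =====

-- lockstep invariant: A's position `start` corresponds to B's remaining suffix `rest`
lemma loop_agree (text : String) (c o : Int) (hc : 0 ≤ c) (ho : o < c) :
    ∀ (fuel : Nat) (start : Int) (rest : String) (chunks : List String),
      0 ≤ start →
      rest.toList = text.toList.drop start.toNat →
      ((text.length : Int) - start).toNat < fuel →
      chunkLoopA text c o fuel start chunks =
        (let r := chunkLoopB c (c - o) fuel rest chunks
         if r.2 = "" then r.1 else r.1 ++ [r.2]) := by
  intro fuel
  induction fuel with
  | zero => intro start rest chunks _ _ hf; omega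
  | succ fuel ih =>
    intro start rest chunks hs hrest hf
    have htl : text.toList.length = text.length := by simp
    have hrl : rest.length = text.length - start.toNat := by
      have h2 : rest.toList.length = rest.length := by simp
      rw [← h2, hrest, List.length_drop, htl]
    by_cases hlt : start < (text.length : Int)
    · have hsL : start.toNat < text.length := by omega
      by_cases hbrk : (text.length : Int) ≤ start + c
      · -- A appends the final (short) chunk and breaks; B exits the loop and appends rest
        have hcond : ¬ c < (rest.length : Int) := by rw [hrl]; omega
        have hrne : rest ≠ "" := by
          intro h
          rw [h] at hrl
          simp at hrl
          omega
        have hchunk : PySem.Str.slice text (some start) (some (start + c)) = rest := by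
          apply String.toList_inj.mp
          rw [hrest]
          simp only [PySem.Str.toList_slice, PySem.Chars.slice_eq_listSlice]
          rw [PySem.List.slice_toNat _ hs (by omega)]
          apply List.take_of_length_le
          simp only [List.length_drop, htl]
          omega
        simp [chunkLoopA, chunkLoopB, hlt, hbrk, hcond, hchunk, hrne]
      · -- both loops take one more step
        have hnb : ¬ (text.length : Int) ≤ start + c := by omega
        have hcond : c < (rest.length : Int) := by rw [hrl]; omega
        have hchunk : PySem.Str.slice text (some start) (some (start + c)) =
            PySem.Str.slice rest none (some c) := by
          apply String.toList_inj.mp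
          simp only [PySem.Str.toList_slice, PySem.Chars.slice_eq_listSlice]
          rw [PySem.List.slice_toNat _ hs (by omega), PySem.List.slice_to _ hc, hrest]
          congr 1
          omega
        have hrest' : (PySem.Str.slice rest (some (c - o)) none).toList =
            text.toList.drop (start + c - o).toNat := by
          simp only [PySem.Str.toList_slice, PySem.Chars.slice_eq_listSlice]
          rw [PySem.List.slice_from _ (by omega), hrest, List.drop_drop]
          congr 1
          omega
        have hih := ih (start + c - o) (PySem.Str.slice rest (some (c - o)) none)
          (chunks ++ [PySem.Str.slice rest none (some c)]) (by omega) hrest' (by omega)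
        simp [chunkLoopA, chunkLoopB, hlt, hnb, hcond, hchunk] at hih ⊢
        exact hih
    · -- A's loop condition fails: rest is empty, B exits and appends nothing
      have hrnil : rest.toList = [] := by
        rw [hrest]
        exact List.drop_eq_nil_of_le (by omega)
      have hre : rest = "" := String.toList_inj.mp (by simp [hrnil])
      have hc0 : ¬ c < (0 : Int) := by omega
      simp [chunkLoopA, chunkLoopB, hlt, hre, hc0]

-- ===== VERDICT (by name: the statement is the Claim_ definition above) =====
theorem chunk_by_character_count_spec : Claim_equal_chunk_by_character_count := by
  intro text c o _ hpre
  obtain ⟨hc, ho⟩ := hpre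
  unfold Spec_chunk_by_character_count
  unfold chunk_by_character_count chunk_by_character_count_alt
  have hns : ¬ c ≤ o := by omega
  rw [if_neg hns, if_neg hns]
  have htl : PySem.Str.len text = (text.length : Int) := by simp
  exact loop_agree text c o hc ho ((PySem.Str.len text).toNat + 1) 0 text []
    le_rfl (by simp) (by rw [htl]; omega)
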